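-- pv_equiv track=rewrite | github.com/Thrad5/Advent_of_Code | 2025/day08/solution.py | combineGroups2
-- ===== SOURCE A (Python) =====
-- def combineGroups2(groups):
--     merged_groups = []
--     to_remove = []
--     for x in range(len(groups)-1):
--         for y in range(x+1,len(groups)):
--             if len(groups[x].intersection(groups[y])) > 0:
--                 new_group = groups[x].union(groups[y])
--                 to_remove.append(groups[x])
--                 to_remove.append(groups[y])
--                 merged_groups.append(new_group)
--                 break
--         if to_remove != []:
--             break
--     for rem in to_remove:
--         if rem in groups:
--             groups.remove(rem)
--     merged_groups = merged_groups + groups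
--     return merged_groups
-- ===== SOURCE B (Python) =====
-- def combineGroups2(groups):
--     # element -> index of first group containing it; x = smallest first index of an intersecting pair
--     first = {}
--     x = None
--     for i, g in enumerate(groups):
--         for e in g:
--             j = first.setdefault(e, i)
--             if j < i and (x is None or j < x):
--                 x = j
--     if x is None:
--         return groups
--     gx = groups[x]
--     y = None
--     for i in range(x + 1, len(groups)):
--         if groups[i] & gx:
--             y = i
--             break
--     return [gx | groups[y]] + groups[:x] + groups[x + 1:y] + groups[y + 1:]
-- ===== Notes on version B (the rewrite author's own statement) =====
-- stated objective: alternative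
-- what changed: A scans group pairs (x,y) with nested loops of set intersections and removes the two merged sets by value; B instead builds an element-to-first-group-index map in one pass over all elements to locate the smallest first index x of an intersecting pair, scans once for its smallest partner y, and rebuilds the result with three slices.
import Mathlib
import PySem

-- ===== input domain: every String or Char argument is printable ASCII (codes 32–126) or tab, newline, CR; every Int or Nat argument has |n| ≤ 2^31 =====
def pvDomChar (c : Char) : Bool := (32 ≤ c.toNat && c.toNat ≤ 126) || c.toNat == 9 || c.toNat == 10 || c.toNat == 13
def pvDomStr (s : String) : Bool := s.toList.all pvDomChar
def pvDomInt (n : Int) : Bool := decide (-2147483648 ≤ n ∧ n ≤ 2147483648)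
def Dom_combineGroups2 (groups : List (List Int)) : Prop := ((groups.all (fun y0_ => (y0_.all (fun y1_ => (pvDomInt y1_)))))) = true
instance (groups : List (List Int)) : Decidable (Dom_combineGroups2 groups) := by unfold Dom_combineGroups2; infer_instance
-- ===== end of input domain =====

-- B replaces A's nested pairwise-intersection scan by an element→first-group-index map plus one
-- partner scan and three slices (objective: alternative). Equivalence is about the RETURN value
-- only: Python A removes the two merged sets from the caller's list in place, B does not mutate it.

-- ===== PORT A =====
-- inner 'for y in range(x+1, len(groups))' with break: first y whose group meets gx
def pvAin (groups : List (List Int)) (gx : List Int) : List Int → Option Int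
  | [] => none
  | y :: ys =>
    if 0 < PySem.Set.len (PySem.Set.inter (PySem.Set.ofList gx) (PySem.List.pyGetD groups y [])) then
      some y
    else pvAin groups gx ys

-- outer 'for x in range(len(groups)-1)': breaks as soon as to_remove is non-empty,
-- i.e. returns the first (x, y) found (with to_remove = [groups[x], groups[y]])
def pvAout (groups : List (List Int)) : List Int → Option (Int × Int)
  | [] => none
  | x :: xs =>
    match pvAin groups (PySem.List.pyGetD groups x []) (PySem.List.pyRange (x + 1) (PySem.List.len groups) 1) with
    | some y => some (x, y)
    | none => pvAout groups xs

-- 'if rem in groups: groups.remove(rem)' — Python compares SETS (==, membership-equality),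
-- so this is remove-first-set-equal, a no-op when absent (hand-ported, exact)
def pvRemoveSetEq (rem : List Int) : List (List Int) → List (List Int)
  | [] => []
  | g :: t => if PySem.Set.equal rem g then t else g :: pvRemoveSetEq rem t

def combineGroups2 (groups : List (List Int)) : List (List Int) :=
  match pvAout groups (PySem.List.pyRange 0 (PySem.List.len groups - 1) 1) with
  | none => groups
  | some (x, y) =>
    let gx := PySem.List.pyGetD groups x []
    let gy := PySem.List.pyGetD groups y []
    PySem.Set.union (PySem.Set.ofList gx) gy :: pvRemoveSetEq gy (pvRemoveSetEq gx groups)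

-- ===== PORT B =====
-- one step of the element loop: j = first.setdefault(e, i); maybe lower x to j
def pvBstep (i : Int) (st : PySem.Dict Int Int × Option Int) (e : Int) : PySem.Dict Int Int × Option Int :=
  let j := PySem.Dict.getD st.1 e i
  let d := PySem.Dict.setdefault st.1 e i
  if j < i && (match st.2 with | none => true | some x => decide (j < x)) then (d, some j)
  else (d, st.2)

-- 'for i, g in enumerate(groups): for e in g: …'
def pvBscan (i : Int) (st : PySem.Dict Int Int × Option Int) : List (List Int) → PySem.Dict Int Int × Option Int
  | [] => st
  | g :: t => pvBscan (i + 1) (g.foldl (pvBstep i) st) t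

-- 'for i in range(x+1, len(groups)): if groups[i] & gx: y = i; break'
def pvBfindY (groups : List (List Int)) (gx : List Int) : List Int → Option Int
  | [] => none
  | i :: is =>
    if !(PySem.Set.inter (PySem.Set.ofList (PySem.List.pyGetD groups i [])) gx).isEmpty then some i
    else pvBfindY groups gx is

def combineGroups2_alt (groups : List (List Int)) : List (List Int) :=
  match (pvBscan 0 (PySem.Dict.empty, none) groups).2 with
  | none => groups
  | some x =>
    let gx := PySem.List.pyGetD groups x []
    match pvBfindY groups gx (PySem.List.pyRange (x + 1) (PySem.List.len groups) 1) with
    | none => groups  -- totality guard only: a partner always exists once x was found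
    | some y =>
      PySem.Set.union (PySem.Set.ofList gx) (PySem.List.pyGetD groups y []) ::
        (PySem.List.slice groups none (some x) ++ PySem.List.slice groups (some (x + 1)) (some y) ++
          PySem.List.slice groups (some (y + 1)) none)

-- ===== PRECONDITION & SPEC =====
def Spec_combineGroups2 (groups : List (List Int)) (out : List (List Int)) : Prop := out = combineGroups2_alt groups
instance (groups : List (List Int)) (out : List (List Int)) : Decidable (Spec_combineGroups2 groups out) := by unfold Spec_combineGroups2; infer_instance

-- ===== CLAIM (what is proved, stated in full; the proofs are below) =====
def Claim_equal_combineGroups2 : Prop := ∀ (groups : List (List Int)), Dom_combineGroups2 groups → Spec_combineGroups2 groups (combineGroups2 groups)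

-- ===== LEMMAS AND PROOFS =====

-- two groups share an element
def pvIsect (a b : List Int) : Prop := ∃ e, e ∈ a ∧ e ∈ b

-- index (0-based) of the first group containing e
def pvFirstIdx : List (List Int) → Int → Option Nat
  | [], _ => none
  | g :: t, e => if e ∈ g then some 0 else (pvFirstIdx t e).map (· + 1)

-- j is the first component of some intersecting pair
def pvHasPair (gs : List (List Int)) (j : Nat) : Prop :=
  ∃ i : Nat, j < i ∧ i < gs.length ∧ pvIsect (gs.getD j []) (gs.getD i [])

-- x? is the least such j (as an Option Int)
def pvMinPair (gs : List (List Int)) : Option Int → Prop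
  | none => ∀ j, ¬ pvHasPair gs j
  | some x => ∃ k : Nat, x = (k : Int) ∧ pvHasPair gs k ∧ ∀ j < k, ¬ pvHasPair gs j

-- the dict is exactly the first-index map of the processed prefix
def pvDInv (gs : List (List Int)) (d : PySem.Dict Int Int) : Prop :=
  ∀ e, d.get? e = (pvFirstIdx gs e).map (fun k => (k : Int))

lemma pvTA_iff (gx g : List Int) :
    0 < PySem.Set.len (PySem.Set.inter (PySem.Set.ofList gx) g) ↔ pvIsect gx g := by
  unfold pvIsect
  rw [PySem.Set.len, Int.natCast_pos, List.length_pos_iff_exists_mem]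
  constructor
  · rintro ⟨e, he⟩
    have := (PySem.Set.mem_inter _ _ _).mp he
    exact ⟨e, (PySem.Set.mem_ofList _ _).mp this.1, this.2⟩
  · rintro ⟨e, h1, h2⟩
    exact ⟨e, (PySem.Set.mem_inter _ _ _).mpr ⟨(PySem.Set.mem_ofList _ _).mpr h1, h2⟩⟩

lemma pvTB_iff (gx g : List Int) :
    ((PySem.Set.inter (PySem.Set.ofList g) gx).isEmpty = false) ↔ pvIsect gx g := by
  unfold pvIsect
  rw [List.isEmpty_eq_false_iff_exists_mem]
  constructor
  · rintro ⟨e, he⟩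
    have := (PySem.Set.mem_inter _ _ _).mp he
    exact ⟨e, this.2, (PySem.Set.mem_ofList _ _).mp this.1⟩
  · rintro ⟨e, h1, h2⟩
    exact ⟨e, (PySem.Set.mem_inter _ _ _).mpr ⟨(PySem.Set.mem_ofList _ _).mpr h2, h1⟩⟩

lemma pvAin_none_iff (groups : List (List Int)) (gx : List Int) (a b : Int) :
    pvAin groups gx (PySem.List.pyRange a b 1) = none ↔
      ∀ z, a ≤ z → z < b → ¬ pvIsect gx (PySem.List.pyGetD groups z []) := by
  suffices h : ∀ (n : Nat) (a : Int), (b - a).toNat = n →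
      (pvAin groups gx (PySem.List.pyRange a b 1) = none ↔
        ∀ z, a ≤ z → z < b → ¬ pvIsect gx (PySem.List.pyGetD groups z [])) from h _ a rfl
  intro n
  induction n with
  | zero =>
    intro a h0
    rw [PySem.List.pyRange_one_eq_nil (by omega)]
    simp only [pvAin]
    constructor
    · intro _ z h1 h2 _; omega
    · intro _; trivial
  | succ n ih =>
    intro a hs
    have hab : a < b := by omega
    rw [PySem.List.pyRange_one_cons hab]
    simp only [pvAin]
    by_cases ht : pvIsect gx (PySem.List.pyGetD groups a [])
    · rw [if_pos ((pvTA_iff _ _).mpr ht)]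
      constructor
      · intro h; cases h
      · intro h; exact absurd ht (h a le_rfl hab)
    · rw [if_neg (fun hc => ht ((pvTA_iff _ _).mp hc)), ih (a + 1) (by omega)]
      constructor
      · intro h z h1 h2
        rcases eq_or_lt_of_le h1 with rfl | h1'
        · exact ht
        · exact h z (by omega) h2
      · intro h z h1 h2
        exact h z (by omega) h2

lemma pvAin_some_iff (groups : List (List Int)) (gx : List Int) (a b y : Int) :
    pvAin groups gx (PySem.List.pyRange a b 1) = some y ↔
      (a ≤ y ∧ y < b ∧ pvIsect gx (PySem.List.pyGetD groups y []) ∧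
        ∀ z, a ≤ z → z < y → ¬ pvIsect gx (PySem.List.pyGetD groups z [])) := by
  suffices h : ∀ (n : Nat) (a : Int), (b - a).toNat = n →
      (pvAin groups gx (PySem.List.pyRange a b 1) = some y ↔
        (a ≤ y ∧ y < b ∧ pvIsect gx (PySem.List.pyGetD groups y []) ∧
          ∀ z, a ≤ z → z < y → ¬ pvIsect gx (PySem.List.pyGetD groups z []))) from h _ a rfl
  intro n
  induction n with
  | zero =>
    intro a h0
    rw [PySem.List.pyRange_one_eq_nil (by omega)]
    simp only [pvAin]
    constructor
    · intro h; cases h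
    · rintro ⟨h1, h2, -⟩; omega
  | succ n ih =>
    intro a hs
    have hab : a < b := by omega
    rw [PySem.List.pyRange_one_cons hab]
    simp only [pvAin]
    by_cases ht : pvIsect gx (PySem.List.pyGetD groups a [])
    · rw [if_pos ((pvTA_iff _ _).mpr ht)]
      constructor
      · intro h
        cases h
        exact ⟨le_rfl, hab, ht, fun z h1 h2 => absurd h1 (by omega)⟩
      · rintro ⟨h1, h2, h3, h4⟩
        rcases eq_or_lt_of_le h1 with rfl | h1'
        · rfl
        · exact absurd ht (h4 a le_rfl h1')
    · rw [if_neg (fun hc => ht ((pvTA_iff _ _).mp hc)), ih (a + 1) (by omega)]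
      constructor
      · rintro ⟨h1, h2, h3, h4⟩
        refine ⟨by omega, h2, h3, fun z hz1 hz2 => ?_⟩
        rcases eq_or_lt_of_le hz1 with rfl | hz'
        · exact ht
        · exact h4 z (by omega) hz2
      · rintro ⟨h1, h2, h3, h4⟩
        have hya : a ≠ y := fun h => ht (h ▸ h3)
        refine ⟨by omega, h2, h3, fun z hz1 hz2 => h4 z (by omega) hz2⟩

lemma pvAout_none_iff (groups : List (List Int)) (a b : Int) :
    pvAout groups (PySem.List.pyRange a b 1) = none ↔
      ∀ z, a ≤ z → z < b →
        pvAin groups (PySem.List.pyGetD groups z []) (PySem.List.pyRange (z + 1) (PySem.List.len groups) 1) = none := by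
  suffices h : ∀ (n : Nat) (a : Int), (b - a).toNat = n →
      (pvAout groups (PySem.List.pyRange a b 1) = none ↔
        ∀ z, a ≤ z → z < b →
          pvAin groups (PySem.List.pyGetD groups z []) (PySem.List.pyRange (z + 1) (PySem.List.len groups) 1) = none) from
    h _ a rfl
  intro n
  induction n with
  | zero =>
    intro a h0
    rw [PySem.List.pyRange_one_eq_nil (by omega)]
    simp only [pvAout]
    constructor
    · intro _ z h1 h2; omega
    · intro _; trivial
  | succ n ih =>
    intro a hs
    have hab : a < b := by omega
    rw [PySem.List.pyRange_one_cons hab]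
    simp only [pvAout]
    cases hI : pvAin groups (PySem.List.pyGetD groups a []) (PySem.List.pyRange (a + 1) (PySem.List.len groups) 1) with
    | some y =>
      constructor
      · intro h; cases h
      · intro h; rw [h a le_rfl hab] at hI; cases hI
    | none =>
      rw [ih (a + 1) (by omega)]
      constructor
      · intro h z h1 h2
        rcases eq_or_lt_of_le h1 with rfl | h1'
        · exact hI
        · exact h z (by omega) h2
      · intro h z h1 h2
        exact h z (by omega) h2

lemma pvAout_some_iff (groups : List (List Int)) (a b x y : Int) :
    pvAout groups (PySem.List.pyRange a b 1) = some (x, y) ↔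
      (a ≤ x ∧ x < b ∧
        pvAin groups (PySem.List.pyGetD groups x []) (PySem.List.pyRange (x + 1) (PySem.List.len groups) 1) = some y ∧
        ∀ z, a ≤ z → z < x →
          pvAin groups (PySem.List.pyGetD groups z []) (PySem.List.pyRange (z + 1) (PySem.List.len groups) 1) = none) := by
  suffices h : ∀ (n : Nat) (a : Int), (b - a).toNat = n →
      (pvAout groups (PySem.List.pyRange a b 1) = some (x, y) ↔
        (a ≤ x ∧ x < b ∧
          pvAin groups (PySem.List.pyGetD groups x []) (PySem.List.pyRange (x + 1) (PySem.List.len groups) 1) = some y ∧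
          ∀ z, a ≤ z → z < x →
            pvAin groups (PySem.List.pyGetD groups z []) (PySem.List.pyRange (z + 1) (PySem.List.len groups) 1) = none)) from
    h _ a rfl
  intro n
  induction n with
  | zero =>
    intro a h0
    rw [PySem.List.pyRange_one_eq_nil (by omega)]
    simp only [pvAout]
    constructor
    · intro h; cases h
    · rintro ⟨h1, h2, -⟩; omega
  | succ n ih =>
    intro a hs
    have hab : a < b := by omega
    rw [PySem.List.pyRange_one_cons hab]
    simp only [pvAout]
    cases hI : pvAin groups (PySem.List.pyGetD groups a []) (PySem.List.pyRange (a + 1) (PySem.List.len groups) 1) with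
    | some y' =>
      constructor
      · intro h
        cases h
        exact ⟨le_rfl, hab, hI, fun z h1 h2 => absurd h1 (by omega)⟩
      · rintro ⟨h1, h2, h3, h4⟩
        rcases eq_or_lt_of_le h1 with rfl | h1'
        · rw [hI] at h3; cases h3; rfl
        · rw [h4 a le_rfl h1'] at hI; cases hI
    | none =>
      rw [ih (a + 1) (by omega)]
      constructor
      · rintro ⟨h1, h2, h3, h4⟩
        refine ⟨by omega, h2, h3, fun z hz1 hz2 => ?_⟩
        rcases eq_or_lt_of_le hz1 with rfl | hz'
        · exact hI
        · exact h4 z (by omega) hz2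
      · rintro ⟨h1, h2, h3, h4⟩
        have hxa : a ≠ x := by
          rintro rfl
          rw [hI] at h3; cases h3
        refine ⟨by omega, h2, h3, fun z hz1 hz2 => h4 z (by omega) hz2⟩

lemma pvBfindY_eq (groups : List (List Int)) (gx : List Int) (ys : List Int) :
    pvBfindY groups gx ys = pvAin groups gx ys := by
  induction ys with
  | nil => rfl
  | cons i is ih =>
    by_cases h : pvIsect gx (PySem.List.pyGetD groups i [])
    · have hB := (pvTB_iff gx _).mpr h
      have hA := (pvTA_iff gx _).mpr h
      simp only [pvBfindY, pvAin, hB, if_pos hA, Bool.not_false, if_true]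
    · have hB : ¬ ((PySem.Set.inter (PySem.Set.ofList (PySem.List.pyGetD groups i [])) gx).isEmpty = false) :=
        fun hc => h ((pvTB_iff gx _).mp hc)
      have hB' : (PySem.Set.inter (PySem.Set.ofList (PySem.List.pyGetD groups i [])) gx).isEmpty = true := by
        cases hE : (PySem.Set.inter (PySem.Set.ofList (PySem.List.pyGetD groups i [])) gx).isEmpty
        · exact absurd hE hB
        · rfl
      have hA : ¬ (0 < PySem.Set.len (PySem.Set.inter (PySem.Set.ofList gx) (PySem.List.pyGetD groups i []))) :=
        fun hc => h ((pvTA_iff _ _).mp hc)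
      simp only [pvBfindY, pvAin, hB', if_neg hA, Bool.not_true]
      exact ih

lemma pvGetD_append (ps qs : List (List Int)) (j : Nat) :
    (ps ++ qs).getD j [] = if j < ps.length then ps.getD j [] else qs.getD (j - ps.length) [] := by
  simp only [List.getD_eq_getElem?_getD, List.getElem?_append]
  split <;> rfl

lemma pvFirstIdx_spec (e : Int) : ∀ (gs : List (List Int)) (k : Nat),
    pvFirstIdx gs e = some k ↔ (k < gs.length ∧ e ∈ gs.getD k [] ∧ ∀ j < k, e ∉ gs.getD j []) := by
  intro gs
  induction gs with
  | nil => intro k; simp [pvFirstIdx]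
  | cons g t ih =>
    intro k
    by_cases hg : e ∈ g
    · rw [pvFirstIdx, if_pos hg]
      constructor
      · intro h
        cases h
        exact ⟨by simp, by simpa [List.getD], fun j hj => absurd hj (by omega)⟩
      · rintro ⟨h1, h2, h3⟩
        cases k with
        | zero => rfl
        | succ k' => exact absurd hg (h3 0 (by omega))
    · rw [pvFirstIdx, if_neg hg]
      cases k with
      | zero =>
        simp only [Option.map_eq_some_iff]
        constructor
        · rintro ⟨k', -, h⟩; omega
        · rintro ⟨-, h2, -⟩
          exact absurd (by simpa [List.getD] using h2) hg
      | succ k' =>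
        constructor
        · intro h
          rcases Option.map_eq_some_iff.mp h with ⟨k'', hk'', he⟩
          obtain rfl : k'' = k' := by omega
          rcases (ih k'').mp hk'' with ⟨h1, h2, h3⟩
          refine ⟨by simpa using h1, by simpa [List.getD] using h2, fun j hj => ?_⟩
          cases j with
          | zero => simpa [List.getD] using hg
          | succ j' => simpa [List.getD] using h3 j' (by omega)
        · rintro ⟨h1, h2, h3⟩
          have hr : pvFirstIdx t e = some k' := (ih k').mpr
            ⟨by simpa using h1, by simpa [List.getD] using h2,
             fun j hj => by simpa [List.getD] using h3 (j + 1) (by omega)⟩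
          rw [hr]; rfl

lemma pvFirstIdx_none (e : Int) : ∀ (gs : List (List Int)),
    pvFirstIdx gs e = none ↔ ∀ j < gs.length, e ∉ gs.getD j [] := by
  intro gs
  induction gs with
  | nil => simp [pvFirstIdx]
  | cons g t ih =>
    by_cases hg : e ∈ g
    · rw [pvFirstIdx, if_pos hg]
      constructor
      · intro h; cases h
      · intro h; exact absurd hg (by simpa [List.getD] using h 0 (by simp))
    · rw [pvFirstIdx, if_neg hg]
      simp only [Option.map_eq_none_iff]
      rw [ih]
      constructor
      · intro h j hj
        cases j with
        | zero => simpa [List.getD] using hg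
        | succ j' => simpa [List.getD] using h j' (by simpa using hj)
      · intro h j hj
        simpa [List.getD] using h (j + 1) (by simpa using hj)

lemma pvFirstIdx_append (ps : List (List Int)) (g : List Int) (e : Int) :
    pvFirstIdx (ps ++ [g]) e =
      match pvFirstIdx ps e with
      | some k => some k
      | none => if e ∈ g then some ps.length else none := by
  induction ps with
  | nil =>
    simp only [List.nil_append, pvFirstIdx]
    cases hg : decide (e ∈ g) with
    | true => rw [if_pos (of_decide_eq_true hg), if_pos (of_decide_eq_true hg)]; rfl
    | false =>
      rw [if_neg (of_decide_eq_false hg), if_neg (of_decide_eq_false hg)]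
      simp
  | cons p t ih =>
    by_cases hp : e ∈ p
    · rw [List.cons_append, pvFirstIdx, if_pos hp, pvFirstIdx, if_pos hp]
    · rw [List.cons_append, pvFirstIdx, if_neg hp, pvFirstIdx, if_neg hp, ih]
      cases h : pvFirstIdx t e with
      | some k => rfl
      | none =>
        by_cases hg : e ∈ g
        · rw [if_pos hg, if_pos hg]; rfl
        · rw [if_neg hg, if_neg hg]; rfl

lemma pvGetD_snoc_lt (ps : List (List Int)) (h : List Int) (i : Nat) (hi : i < ps.length) :
    (ps ++ [h]).getD i [] = ps.getD i [] := by
  rw [pvGetD_append, if_pos hi]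

lemma pvGetD_snoc_self (ps : List (List Int)) (h : List Int) :
    (ps ++ [h]).getD ps.length [] = h := by
  rw [pvGetD_append, if_neg (by omega), Nat.sub_self]
  rfl

lemma pvHasPair_snoc (ps : List (List Int)) (g1 : List Int) (e : Int) (j : Nat) :
    pvHasPair (ps ++ [g1 ++ [e]]) j ↔ (pvHasPair (ps ++ [g1]) j ∨ (j < ps.length ∧ e ∈ ps.getD j [])) := by
  unfold pvHasPair pvIsect
  constructor
  · rintro ⟨i, hji, hlen, e', he1, he2⟩
    have hlen' : i < ps.length + 1 := by simpa using hlen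
    have hjp : j < ps.length := by omega
    rw [pvGetD_snoc_lt _ _ _ hjp] at he1
    rcases Nat.lt_or_ge i ps.length with hi | hi
    · rw [pvGetD_snoc_lt _ _ _ hi] at he2
      exact Or.inl ⟨i, hji, by simpa using hlen', e', by rwa [pvGetD_snoc_lt _ _ _ hjp],
        by rwa [pvGetD_snoc_lt _ _ _ hi]⟩
    · have hieq : i = ps.length := by omega
      subst hieq
      rw [pvGetD_snoc_self] at he2
      rcases List.mem_append.mp he2 with hg | hee
      · exact Or.inl ⟨ps.length, hji, by simp, e', by rwa [pvGetD_snoc_lt _ _ _ hjp],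
          by rw [pvGetD_snoc_self]; exact hg⟩
      · have : e' = e := by simpa using hee
        subst this
        exact Or.inr ⟨hjp, he1⟩
  · rintro (⟨i, hji, hlen, e', he1, he2⟩ | ⟨hjp, hem⟩)
    · have hlen' : i < ps.length + 1 := by simpa using hlen
      have hjp : j < ps.length := by omega
      rw [pvGetD_snoc_lt _ _ _ hjp] at he1
      rcases Nat.lt_or_ge i ps.length with hi | hi
      · rw [pvGetD_snoc_lt _ _ _ hi] at he2
        exact ⟨i, hji, by simpa using hlen', e', by rwa [pvGetD_snoc_lt _ _ _ hjp],
          by rwa [pvGetD_snoc_lt _ _ _ hi]⟩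
      · have hieq : i = ps.length := by omega
        subst hieq
        rw [pvGetD_snoc_self] at he2
        exact ⟨ps.length, hji, by simp, e', by rwa [pvGetD_snoc_lt _ _ _ hjp],
          by rw [pvGetD_snoc_self]; exact List.mem_append.mpr (Or.inl he2)⟩
    · exact ⟨ps.length, hjp, by simp, e, by rwa [pvGetD_snoc_lt _ _ _ hjp],
        by rw [pvGetD_snoc_self]; exact List.mem_append.mpr (Or.inr (by simp))⟩

lemma pvBstep_inv (ps : List (List Int)) (g1 : List Int) (e : Int) (d : PySem.Dict Int Int) (x? : Option Int)
    (hd : pvDInv (ps ++ [g1]) d) (hx : pvMinPair (ps ++ [g1]) x?) :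
    pvDInv (ps ++ [g1 ++ [e]]) (pvBstep (ps.length : Int) (d, x?) e).1 ∧
      pvMinPair (ps ++ [g1 ++ [e]]) (pvBstep (ps.length : Int) (d, x?) e).2 := by
  have hget : PySem.Dict.getD d e (ps.length : Int) =
      ((pvFirstIdx (ps ++ [g1]) e).map (fun k => (k : Int))).getD (ps.length : Int) := by
    rw [PySem.Dict.getD_eq_get?_getD, hd e]
  have hd' : pvDInv (ps ++ [g1 ++ [e]]) (PySem.Dict.setdefault d e (ps.length : Int)) := by
    intro e'
    by_cases hee : e' = e
    · subst hee
      rw [PySem.Dict.get?_setdefault_self, hd e']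
      rw [pvFirstIdx_append ps (g1 ++ [e']) e', pvFirstIdx_append ps g1 e']
      cases hfe : pvFirstIdx ps e' with
      | some k => rfl
      | none =>
        by_cases hg1 : e' ∈ g1
        · simp [hg1]
        · simp [hg1]
    · rw [PySem.Dict.get?_setdefault_of_ne _ _ hee, hd e']
      rw [pvFirstIdx_append ps (g1 ++ [e]) e', pvFirstIdx_append ps g1 e']
      cases hfe : pvFirstIdx ps e' with
      | some k => rfl
      | none =>
        by_cases hg1 : e' ∈ g1
        · simp [hg1]
        · simp [hg1, hee]
  have hsnoc := pvHasPair_snoc ps g1 e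
  cases hfe : pvFirstIdx ps e with
  | some k =>
    rcases (pvFirstIdx_spec e ps k).mp hfe with ⟨hkL, hkmem, hkmin⟩
    have hgs : pvFirstIdx (ps ++ [g1]) e = some k := by
      rw [pvFirstIdx_append, hfe]
    have hj : PySem.Dict.getD d e (ps.length : Int) = (k : Int) := by
      rw [hget, hgs]; rfl
    have hkpair : pvHasPair (ps ++ [g1 ++ [e]]) k := (hsnoc k).mpr (Or.inr ⟨hkL, hkmem⟩)
    cases x? with
    | none =>
      have hst : pvBstep (ps.length : Int) (d, none) e =
          (PySem.Dict.setdefault d e (ps.length : Int), some (k : Int)) := by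
        simp only [pvBstep, hj]
        rw [if_pos (by simp [hkL])]
      rw [hst]
      refine ⟨hd', k, rfl, hkpair, fun j hjk hS => ?_⟩
      rcases (hsnoc j).mp hS with hS' | ⟨hjL, hjm⟩
      · exact hx j hS'
      · exact hkmin j hjk hjm
    | some x =>
      rcases hx with ⟨kx, rfl, hp, hm⟩
      by_cases hkk : k < kx
      · have hst : pvBstep (ps.length : Int) (d, some (kx : Int)) e =
            (PySem.Dict.setdefault d e (ps.length : Int), some (k : Int)) := by
          simp only [pvBstep, hj]
          rw [if_pos (by simp [hkL, hkk])]
        rw [hst]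
        refine ⟨hd', k, rfl, hkpair, fun j hjk hS => ?_⟩
        rcases (hsnoc j).mp hS with hS' | ⟨hjL, hjm⟩
        · exact hm j (hjk.trans hkk) hS'
        · exact hkmin j hjk hjm
      · have hst : pvBstep (ps.length : Int) (d, some (kx : Int)) e =
            (PySem.Dict.setdefault d e (ps.length : Int), some (kx : Int)) := by
          simp only [pvBstep, hj]
          rw [if_neg (by simp [hkk])]
        rw [hst]
        refine ⟨hd', kx, rfl, (hsnoc kx).mpr (Or.inl hp), fun j hjkx hS => ?_⟩
        rcases (hsnoc j).mp hS with hS' | ⟨hjL, hjm⟩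
        · exact hm j hjkx hS'
        · have hjk : ¬ j < k := fun h => hkmin j h hjm
          omega
  | none =>
    have hnone := (pvFirstIdx_none e ps).mp hfe
    have hj : PySem.Dict.getD d e (ps.length : Int) = (ps.length : Int) := by
      rw [hget, pvFirstIdx_append, hfe]
      by_cases hg1 : e ∈ g1
      · simp [hg1]
      · simp [hg1]
    have hst : pvBstep (ps.length : Int) (d, x?) e =
        (PySem.Dict.setdefault d e (ps.length : Int), x?) := by
      simp only [pvBstep, hj]
      rw [if_neg (by simp)]
    rw [hst]
    refine ⟨hd', ?_⟩
    cases x? with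
    | none =>
      intro j hS
      rcases (hsnoc j).mp hS with hS' | ⟨hjL, hjm⟩
      · exact hx j hS'
      · exact hnone j hjL hjm
    | some x =>
      rcases hx with ⟨kx, rfl, hp, hm⟩
      refine ⟨kx, rfl, (hsnoc kx).mpr (Or.inl hp), fun j hjkx hS => ?_⟩
      rcases (hsnoc j).mp hS with hS' | ⟨hjL, hjm⟩
      · exact hm j hjkx hS'
      · exact hnone j hjL hjm

lemma pvBfold_inv (ps : List (List Int)) : ∀ (g2 g1 : List Int) (d : PySem.Dict Int Int) (x? : Option Int),
    pvDInv (ps ++ [g1]) d → pvMinPair (ps ++ [g1]) x? →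
    pvDInv (ps ++ [g1 ++ g2]) ((g2.foldl (pvBstep (ps.length : Int)) (d, x?)).1) ∧
      pvMinPair (ps ++ [g1 ++ g2]) ((g2.foldl (pvBstep (ps.length : Int)) (d, x?)).2) := by
  intro g2
  induction g2 with
  | nil =>
    intro g1 d x? hd hx
    simp only [List.append_nil, List.foldl_nil]
    exact ⟨hd, hx⟩
  | cons e g2' ih =>
    intro g1 d x? hd hx
    have hstep := pvBstep_inv ps g1 e d x? hd hx
    have h2 := ih (g1 ++ [e]) (pvBstep (ps.length : Int) (d, x?) e).1
      (pvBstep (ps.length : Int) (d, x?) e).2 hstep.1 hstep.2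
    rw [Prod.mk.eta] at h2
    rw [show g1 ++ [e] ++ g2' = g1 ++ (e :: g2') from by simp] at h2
    rw [List.foldl_cons]
    exact h2

lemma pvInv_nil_group (ps : List (List Int)) (d : PySem.Dict Int Int) (x? : Option Int)
    (hd : pvDInv ps d) (hx : pvMinPair ps x?) :
    pvDInv (ps ++ [[]]) d ∧ pvMinPair (ps ++ [[]]) x? := by
  have hfe : ∀ e, pvFirstIdx (ps ++ [[]]) e = pvFirstIdx ps e := by
    intro e
    rw [pvFirstIdx_append]
    cases pvFirstIdx ps e with
    | some k => rfl
    | none => simp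
  have hhp : ∀ j, pvHasPair (ps ++ [[]]) j ↔ pvHasPair ps j := by
    intro j
    unfold pvHasPair pvIsect
    constructor
    · rintro ⟨i, hji, hlen, e', he1, he2⟩
      have hlen' : i < ps.length + 1 := by simpa using hlen
      have hjp : j < ps.length := by omega
      rcases Nat.lt_or_ge i ps.length with hi | hi
      · exact ⟨i, hji, hi, e', by rwa [pvGetD_snoc_lt _ _ _ hjp] at he1,
          by rwa [pvGetD_snoc_lt _ _ _ hi] at he2⟩
      · have hieq : i = ps.length := by omega
        subst hieq
        rw [pvGetD_snoc_self] at he2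
        cases he2
    · rintro ⟨i, hji, hlen, e', he1, he2⟩
      have hjp : j < ps.length := by omega
      exact ⟨i, hji, by simp; omega, e', by rwa [pvGetD_snoc_lt _ _ _ hjp],
        by rwa [pvGetD_snoc_lt _ _ _ hlen]⟩
  constructor
  · intro e; rw [hd e, hfe e]
  · cases x? with
    | none =>
      intro j h
      exact hx j ((hhp j).mp h)
    | some x =>
      rcases hx with ⟨k, rfl, hk1, hk2⟩
      exact ⟨k, rfl, (hhp k).mpr hk1, fun j hj hc => hk2 j hj ((hhp j).mp hc)⟩

lemma pvBscan_inv : ∀ (rest ps : List (List Int)) (d : PySem.Dict Int Int) (x? : Option Int),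
    pvDInv ps d → pvMinPair ps x? →
    pvMinPair (ps ++ rest) (pvBscan (ps.length : Int) (d, x?) rest).2 := by
  intro rest
  induction rest with
  | nil =>
    intro ps d x? hd hx
    simpa using hx
  | cons g t ih =>
    intro ps d x? hd hx
    have h0 := pvInv_nil_group ps d x? hd hx
    have h1 := pvBfold_inv ps g [] d x? h0.1 h0.2
    simp only [List.nil_append] at h1
    have ih' := ih (ps ++ [g]) (g.foldl (pvBstep (ps.length : Int)) (d, x?)).1
      (g.foldl (pvBstep (ps.length : Int)) (d, x?)).2 h1.1 h1.2
    have hlen : (((ps ++ [g]).length : Nat) : Int) = (ps.length : Int) + 1 := by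
      simp
    rw [hlen] at ih'
    rw [Prod.mk.eta] at ih'
    rw [show (ps ++ [g]) ++ t = ps ++ (g :: t) from by simp] at ih'
    rw [pvBscan]
    exact ih'

lemma pvMinPair_groups (groups : List (List Int)) :
    pvMinPair groups (pvBscan 0 (PySem.Dict.empty, none) groups).2 := by
  have h := pvBscan_inv groups [] PySem.Dict.empty none
    (fun e => by simp [PySem.Dict.get?_empty, pvFirstIdx])
    (fun j hj => by rcases hj with ⟨i, -, hlen, -⟩; simp at hlen)
  simp only [List.nil_append, List.length_nil, Nat.cast_zero] at h
  exact h

lemma pvMinPair_unique (gs : List (List Int)) (v w : Option Int) :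
    pvMinPair gs v → pvMinPair gs w → v = w := by
  intro hv hw
  cases v with
  | none =>
    cases w with
    | none => rfl
    | some x =>
      rcases hw with ⟨k, rfl, hk, -⟩
      exact absurd hk (hv k)
  | some x =>
    cases w with
    | none =>
      rcases hv with ⟨k, rfl, hk, -⟩
      exact absurd hk (hw k)
    | some y =>
      rcases hv with ⟨k1, rfl, h1, m1⟩
      rcases hw with ⟨k2, rfl, h2, m2⟩
      have : k1 = k2 := by
        rcases Nat.lt_trichotomy k1 k2 with h | h | h
        · exact absurd h1 (m2 k1 h)
        · exact h
        · exact absurd h2 (m1 k2 h)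
      rw [this]

lemma pvRemoveSetEq_eq (rem : List Int) : ∀ (gs : List (List Int)) (k : Nat), k < gs.length →
    (∀ j < k, PySem.Set.equal rem (gs.getD j []) = false) →
    PySem.Set.equal rem (gs.getD k []) = true →
    pvRemoveSetEq rem gs = gs.take k ++ gs.drop (k + 1) := by
  intro gs
  induction gs with
  | nil => intro k hk; simp at hk
  | cons g t ih =>
    intro k hk h1 h2
    cases k with
    | zero =>
      have : PySem.Set.equal rem g = true := by simpa [List.getD] using h2
      rw [pvRemoveSetEq, if_pos this]
      simp
    | succ k' =>
      have h0 : PySem.Set.equal rem g = false := by simpa [List.getD] using h1 0 (by omega)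
      rw [pvRemoveSetEq, if_neg (by simp [h0])]
      rw [ih k' (by simpa using hk)
        (fun j hj => by simpa [List.getD] using h1 (j + 1) (by omega))
        (by simpa [List.getD] using h2)]
      simp

lemma pvGetD_erase (gs : List (List Int)) (k j : Nat) (hk : k < gs.length) :
    (gs.take k ++ gs.drop (k + 1)).getD j [] = if j < k then gs.getD j [] else gs.getD (j + 1) [] := by
  have hlt : (gs.take k).length = k := by
    rw [List.length_take]
    omega
  rw [pvGetD_append, hlt]
  by_cases hj : j < k
  · rw [if_pos hj, if_pos hj]
    simp only [List.getD_eq_getElem?_getD, List.getElem?_take]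
    rw [if_pos hj]
  · rw [if_neg hj, if_neg hj]
    simp only [List.getD_eq_getElem?_getD, List.getElem?_drop]
    have : k + 1 + (j - k) = j + 1 := by omega
    rw [this]

-- ===== VERDICT (by name: the statement is the Claim_ definition above) =====
lemma pvTailAlgebra (groups : List (List Int)) (xn yn : Nat) (hxy : xn < yn) (hyn : yn < groups.length) :
    (groups.take xn ++ groups.drop (xn + 1)).take (yn - 1) ++
      (groups.take xn ++ groups.drop (xn + 1)).drop (yn - 1 + 1) =
    groups.take xn ++ (groups.drop (xn + 1)).take (yn - (xn + 1)) ++ groups.drop (yn + 1) := by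
  have hlt : (groups.take xn).length = xn := by
    rw [List.length_take]
    omega
  have e1 : (groups.take xn ++ groups.drop (xn + 1)).take (yn - 1) =
      groups.take xn ++ (groups.drop (xn + 1)).take (yn - 1 - xn) := by
    rw [List.take_append, hlt, List.take_take]
    have hmin : min (yn - 1) xn = xn := by omega
    rw [hmin]
  have e2 : (groups.take xn ++ groups.drop (xn + 1)).drop (yn - 1 + 1) =
      groups.drop (yn + 1) := by
    have hy : yn - 1 + 1 = yn := by omega
    rw [hy, List.drop_append, hlt]
    rw [List.drop_eq_nil_of_le (by rw [hlt]; omega), List.nil_append, List.drop_drop]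
    congr 1
    omega
  rw [e1, e2]
  have : yn - 1 - xn = yn - (xn + 1) := by omega
  rw [this, List.append_assoc]

-- ===== VERDICT (by name: the statement is the Claim_ definition above) =====
theorem combineGroups2_spec : Claim_equal_combineGroups2 := by
  unfold Claim_equal_combineGroups2
  intro groups _
  unfold Spec_combineGroups2
  cases hA : pvAout groups (PySem.List.pyRange 0 (PySem.List.len groups - 1) 1) with
  | none =>
    have hNone := (pvAout_none_iff groups 0 (PySem.List.len groups - 1)).mp hA
    have hMP : pvMinPair groups none := by
      intro j hj
      rcases hj with ⟨i, hji, hilen, e, he1, he2⟩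
      have hz := hNone (j : Int) (by positivity)
        (by rw [PySem.List.len_eq]; omega)
      have hni := (pvAin_none_iff groups (PySem.List.pyGetD groups (j : Int) [])
          ((j : Int) + 1) (PySem.List.len groups)).mp hz (i : Int)
        (by omega) (by rw [PySem.List.len_eq]; omega)
      simp only [PySem.List.pyGetD_natCast] at hni
      exact hni ⟨e, he1, he2⟩
    have hscan : (pvBscan 0 (PySem.Dict.empty, none) groups).2 = none :=
      pvMinPair_unique groups _ none (pvMinPair_groups groups) hMP
    simp only [combineGroups2, combineGroups2_alt, hA, hscan]
  | some p =>
    obtain ⟨x, y⟩ := p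
    obtain ⟨hx0, hxb, hinner, houter⟩ :=
      (pvAout_some_iff groups 0 (PySem.List.len groups - 1) x y).mp hA
    obtain ⟨hxy, hyb, hIs, hymin⟩ :=
      (pvAin_some_iff groups (PySem.List.pyGetD groups x []) (x + 1) (PySem.List.len groups) y).mp hinner
    rw [PySem.List.len_eq] at hxb hyb
    obtain ⟨xn, rfl⟩ : ∃ xn : Nat, x = (xn : Int) := ⟨x.toNat, by omega⟩
    obtain ⟨yn, rfl⟩ : ∃ yn : Nat, y = (yn : Int) := ⟨y.toNat, by omega⟩
    have hxyn : xn < yn := by omega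
    have hynn : yn < groups.length := by omega
    have hxnn : xn + 1 < groups.length := by omega
    simp only [PySem.List.pyGetD_natCast] at hIs
    have hxmin : ∀ j < xn, ¬ pvHasPair groups j := by
      intro j hj hp
      rcases hp with ⟨i, hji, hilen, e, he1, he2⟩
      have hz := houter (j : Int) (by positivity) (by omega)
      have hni := (pvAin_none_iff groups (PySem.List.pyGetD groups (j : Int) [])
          ((j : Int) + 1) (PySem.List.len groups)).mp hz (i : Int)
        (by omega) (by rw [PySem.List.len_eq]; omega)
      simp only [PySem.List.pyGetD_natCast] at hni
      exact hni ⟨e, he1, he2⟩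
    have hpairx : pvHasPair groups xn := ⟨yn, hxyn, hynn, hIs⟩
    have hMPx : pvMinPair groups (some (xn : Int)) := ⟨xn, rfl, hpairx, hxmin⟩
    have hscan : (pvBscan 0 (PySem.Dict.empty, none) groups).2 = some (xn : Int) :=
      pvMinPair_unique groups _ _ (pvMinPair_groups groups) hMPx
    have hfind : pvBfindY groups (PySem.List.pyGetD groups ((xn : Int)) [])
        (PySem.List.pyRange ((xn : Int) + 1) (PySem.List.len groups) 1) = some (yn : Int) := by
      rw [pvBfindY_eq]
      exact hinner
    obtain ⟨e0, he0x, he0y⟩ := hIs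
    have hrem1 : pvRemoveSetEq (PySem.List.pyGetD groups ((xn : Int)) []) groups =
        groups.take xn ++ groups.drop (xn + 1) := by
      refine pvRemoveSetEq_eq _ groups xn (by omega) ?_ ?_
      · intro j hj
        cases hEq : PySem.Set.equal (PySem.List.pyGetD groups ((xn : Int)) []) (groups.getD j []) with
        | false => rfl
        | true =>
          exfalso
          rw [PySem.List.pyGetD_natCast] at hEq
          have hmem : e0 ∈ groups.getD j [] :=
            ((PySem.Set.equal_iff _ _).mp hEq e0).mp he0x
          exact hxmin j hj ⟨xn, hj, by omega, e0, hmem, he0x⟩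
      · rw [PySem.List.pyGetD_natCast]
        exact (PySem.Set.equal_iff _ _).mpr (fun _ => Iff.rfl)
    have hlen' : (groups.take xn ++ groups.drop (xn + 1)).length = groups.length - 1 := by
      rw [List.length_append, List.length_take, List.length_drop]
      omega
    have hrem2 : pvRemoveSetEq (PySem.List.pyGetD groups ((yn : Int)) [])
        (groups.take xn ++ groups.drop (xn + 1)) =
        (groups.take xn ++ groups.drop (xn + 1)).take (yn - 1) ++
          (groups.take xn ++ groups.drop (xn + 1)).drop (yn - 1 + 1) := by
      refine pvRemoveSetEq_eq _ _ (yn - 1) (by omega) ?_ ?_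
      · intro j hj
        rw [pvGetD_erase groups xn j (by omega)]
        by_cases hjx : j < xn
        · rw [if_pos hjx]
          cases hEq : PySem.Set.equal (PySem.List.pyGetD groups ((yn : Int)) []) (groups.getD j []) with
          | false => rfl
          | true =>
            exfalso
            rw [PySem.List.pyGetD_natCast] at hEq
            have hmem : e0 ∈ groups.getD j [] :=
              ((PySem.Set.equal_iff _ _).mp hEq e0).mp he0y
            exact hxmin j hjx ⟨xn, hjx, by omega, e0, hmem, he0x⟩
        · rw [if_neg hjx]
          cases hEq : PySem.Set.equal (PySem.List.pyGetD groups ((yn : Int)) []) (groups.getD (j + 1) []) with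
          | false => rfl
          | true =>
            exfalso
            rw [PySem.List.pyGetD_natCast] at hEq
            have hmem : e0 ∈ groups.getD (j + 1) [] :=
              ((PySem.Set.equal_iff _ _).mp hEq e0).mp he0y
            have hz := hymin ((j + 1 : Nat) : Int) (by omega) (by omega)
            simp only [PySem.List.pyGetD_natCast] at hz
            exact hz ⟨e0, he0x, hmem⟩
      · rw [pvGetD_erase groups xn (yn - 1) (by omega), if_neg (by omega)]
        have : yn - 1 + 1 = yn := by omega
        rw [this, PySem.List.pyGetD_natCast]
        exact (PySem.Set.equal_iff _ _).mpr (fun _ => Iff.rfl)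
    have hs1 : PySem.List.slice groups none (some ((xn : Int))) = groups.take xn :=
      PySem.List.slice_to_natCast groups xn
    have hs2 : PySem.List.slice groups (some ((xn : Int) + 1)) (some ((yn : Int))) =
        (groups.drop (xn + 1)).take (yn - (xn + 1)) := by
      have h1 : ((xn : Int) + 1) = (((xn + 1 : Nat)) : Int) := by push_cast; ring
      rw [h1, PySem.List.slice_natCast]
    have hs3 : PySem.List.slice groups (some ((yn : Int) + 1)) none = groups.drop (yn + 1) := by
      have h1 : ((yn : Int) + 1) = (((yn + 1 : Nat)) : Int) := by push_cast; ring
      rw [h1, PySem.List.slice_from_natCast]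
    simp only [combineGroups2, combineGroups2_alt, hA, hscan, hfind, hrem1, hrem2, hs1, hs2, hs3]
    rw [pvTailAlgebra groups xn yn hxyn hynn]
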